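-- pv_equiv track=rewrite | github.com/Corray333/python_labs | lab1/lab1/task1.py | specific_devider
-- ===== SOURCE A (Python) =====
-- def gcd(num, begin_of_range):
--     while begin_of_range != 0:
--         num, begin_of_range = begin_of_range, num % begin_of_range
--     return num
--
-- def digits(num):
--     return [int(d) for d in str(num)[::-1]]
--
-- def specific_devider(num):
--     num = abs(num)
--     for i in range(2, num):
--         if num % i == 0:
--             count = sum(gcd(i, j) == 1 for j in digits(num))
--             if count == len(digits(num)):
--                 return i
--     return -1
-- ===== SOURCE B (Python) =====
-- def gcd2(a, b):
--     while b != 0: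
--         a, b = b, a % b
--     return a
--
-- def specific_devider(num):
--     num = abs(num)
--     digs = [int(c) for c in str(num)]
--     ok = lambda k: all(gcd2(k, j) == 1 for j in digs)
--     r = 1
--     while (r + 1) * (r + 1) <= num:
--         r += 1
--     for d in range(2, r + 1):
--         if num % d == 0 and ok(d):
--             return d
--     for d in range(r, 1, -1):
--         if num % d == 0:
--             c = num // d
--             if c != num and ok(c):
--                 return c
--     return -1
-- ===== Notes on version B (the rewrite author's own statement) =====
-- stated objective: faster
-- what changed: B replaces A's linear scan over all candidates 2..num-1 by trial division up to sqrt(num): an ascending pass over small divisors followed by a descending pass that yields the large cofactors in ascending order, testing digit-coprimality in the same ascending divisor order.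
import Mathlib
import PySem

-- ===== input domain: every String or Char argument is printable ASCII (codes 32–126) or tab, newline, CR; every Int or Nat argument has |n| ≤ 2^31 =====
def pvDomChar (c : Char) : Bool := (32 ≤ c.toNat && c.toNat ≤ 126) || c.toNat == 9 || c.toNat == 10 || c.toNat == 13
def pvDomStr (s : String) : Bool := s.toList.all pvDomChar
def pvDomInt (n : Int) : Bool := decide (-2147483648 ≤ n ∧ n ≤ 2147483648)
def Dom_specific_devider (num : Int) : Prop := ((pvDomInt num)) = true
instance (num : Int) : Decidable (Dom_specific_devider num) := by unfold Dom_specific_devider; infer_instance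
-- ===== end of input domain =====

-- B replaces A's O(num) scan of all candidates below num by trial division up to √num
-- (an ascending pass over small divisors, then a descending pass producing the cofactors
-- in ascending order), testing digit-coprimality in the same ascending divisor order.

-- ===== PORT A =====

-- termination fact for the Euclidean-style gcd loop (cited by `decreasing_by` below)
theorem pymod_natAbs_lt (a b : Int) (hb : b ≠ 0) : (PySem.Int.mod a b).natAbs < b.natAbs := by
  rcases lt_or_gt_of_ne hb with h | h
  · have h1 := (PySem.Int.mod_neg_bounds (a := a) (b := b) h).1
    have h2 := (PySem.Int.mod_neg_bounds (a := a) (b := b) h).2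
    omega
  · have h1 := PySem.Int.mod_nonneg (a := a) (b := b) h
    have h2 := PySem.Int.mod_lt (a := a) (b := b) h
    omega

-- `gcd` of Source A; Source B's `gcd2` has the identical body, so both ports share this helper
def pygcd (a b : Int) : Int :=
  if h : b = 0 then a else pygcd b (PySem.Int.mod a b)
termination_by b.natAbs
decreasing_by exact pymod_natAbs_lt a b h

-- int(c) for one character of str(num): on such digit characters PySem.Int.ofChars? is exact
def charToInt (c : Char) : Int := (PySem.Int.ofChars? [c]).getD 0

-- digits(num) of Source A: str(num)[::-1] (PySem.Str.slice?_none_none_neg_one: [::-1] is reverse), each char via int()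
def digitsA (n : Int) : List Int := ((PySem.Int.toChars n).reverse).map charToInt

def specific_devider (num : Int) : Int :=
  let n := |num|
  match (PySem.List.pyRange 2 n 1).find? (fun i =>
      PySem.Int.mod n i == 0 &&
      ((digitsA n).countP (fun j => pygcd i j == 1) == (digitsA n).length)) with
  | some i => i
  | none => -1

-- ===== PORT B =====

-- digs = [int(c) for c in str(num)]
def digitsB (n : Int) : List Int := (PySem.Int.toChars n).map charToInt

-- ok = lambda k: all(gcd2(k, j) == 1 for j in digs)
def okB (digs : List Int) (k : Int) : Bool := digs.all (fun j => pygcd k j == 1)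

-- r = 1; while (r + 1) * (r + 1) <= num: r += 1
def isqLoop (n r : Int) : Int :=
  if h : (r + 1) * (r + 1) ≤ n then isqLoop n (r + 1) else r
termination_by (n - r).toNat
decreasing_by
  have h1 : 0 ≤ r * (r + 1) := by
    by_cases hr : 0 ≤ r
    · exact mul_nonneg hr (by omega)
    · nlinarith
  have h2 : r + 1 ≤ (r + 1) * (r + 1) := by nlinarith
  omega

def specific_devider_alt (num : Int) : Int :=
  let n := |num|
  let digs := digitsB n
  let r := isqLoop n 1
  match (PySem.List.pyRange 2 (r + 1) 1).find? (fun d =>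
      PySem.Int.mod n d == 0 && okB digs d) with
  | some d => d
  | none =>
    match (PySem.List.pyRange r 1 (-1)).findSome? (fun d =>
        if PySem.Int.mod n d == 0 then
          let c := PySem.Int.floordiv n d
          if (c != n) && okB digs c then some c else none
        else none) with
    | some c => c
    | none => -1

-- ===== PRECONDITION & SPEC =====
def Spec_specific_devider (num : Int) (out : Int) : Prop := out = specific_devider_alt num
instance (num : Int) (out : Int) : Decidable (Spec_specific_devider num out) := by unfold Spec_specific_devider; infer_instance

-- ===== CLAIM (what is proved, stated in full; the proofs are below) =====
def Claim_equal_specific_devider : Prop := ∀ (num : Int), Dom_specific_devider num → Spec_specific_devider num (specific_devider num)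

-- ===== LEMMAS AND PROOFS =====

-- find? over a filtered list = find? with the fused predicate
theorem find?_filter_fuse {α : Type} (l : List α) (q p : α → Bool) :
    (l.filter q).find? p = l.find? (fun x => q x && p x) := by
  induction l with
  | nil => rfl
  | cons x l ih =>
    by_cases hq : q x <;> by_cases hp : p x <;>
      simp [hq, hp, ih]

-- the guarded findSome? of B's second loop is a find? over the cofactor list
theorem findSome?_ifchain {α β : Type} (q : α → Bool) (f : α → β) (c p : β → Bool) :
    ∀ l : List α,
      (l.findSome? (fun d => if q d then (if c (f d) && p (f d) then some (f d) else none) else none))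
        = ((((l.filter q).map f).filter c).find? p) := by
  intro l
  induction l with
  | nil => rfl
  | cons x l ih =>
    cases hq : q x
    · simpa only [List.findSome?_cons, List.filter_cons, hq, Bool.false_eq_true,
        if_false, ite_false] using ih
    · cases hc : c (f x)
      · simpa only [List.findSome?_cons, List.filter_cons, List.map_cons, hq, hc,
          Bool.false_and, Bool.false_eq_true, if_true, if_false, ite_true, ite_false] using ih
      · cases hp : p (f x) <;>
          simpa only [List.findSome?_cons, List.filter_cons, List.map_cons, List.find?_cons,
            hq, hc, hp, Bool.and_true, Bool.and_false, Bool.false_eq_true, if_true, if_false,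
            ite_true, ite_false] using ih

-- on a (≤)-sorted list, find? returns exactly the minimum element satisfying p
theorem find?_some_iff_of_sorted {p : Int → Bool} :
    ∀ {l : List Int}, l.Pairwise (· ≤ ·) → ∀ {a : Int},
      (l.find? p = some a ↔ (a ∈ l ∧ p a = true ∧ ∀ x ∈ l, p x = true → a ≤ x)) := by
  intro l hl
  induction l with
  | nil => intro a; simp
  | cons b l ih =>
    have hb : ∀ x ∈ l, b ≤ x := (List.pairwise_cons.mp hl).1
    intro a
    have ih' := ih (List.pairwise_cons.mp hl).2 (a := a)
    cases hpb : p b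
    · rw [List.find?_cons, hpb, ih']
      constructor
      · rintro ⟨ha, hpa, hmin⟩
        refine ⟨List.mem_cons_of_mem b ha, hpa, ?_⟩
        intro x hx hpx
        rcases List.mem_cons.mp hx with rfl | hx'
        · rw [hpb] at hpx; exact absurd hpx (by simp)
        · exact hmin x hx' hpx
      · rintro ⟨ha, hpa, hmin⟩
        have ha' : a ∈ l := by
          rcases List.mem_cons.mp ha with rfl | h
          · rw [hpb] at hpa; exact absurd hpa (by simp)
          · exact h
        exact ⟨ha', hpa, fun x hx hpx => hmin x (List.mem_cons_of_mem b hx) hpx⟩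
    · rw [List.find?_cons, hpb]
      constructor
      · rintro h
        have : b = a := by simpa using h
        subst this
        refine ⟨List.mem_cons_self, hpb, ?_⟩
        intro x hx _
        rcases List.mem_cons.mp hx with rfl | hx'
        · exact le_refl _
        · exact hb x hx'
      · rintro ⟨ha, hpa, hmin⟩
        have hab : a ≤ b := hmin b List.mem_cons_self hpb
        have hba : b ≤ a := by
          rcases List.mem_cons.mp ha with rfl | h
          · exact le_refl a
          · exact hb a h
        simp [le_antisymm hba hab]

-- hence two (≤)-sorted lists with the same elements have the same find?
theorem find?_eq_of_sorted {p : Int → Bool} {l₁ l₂ : List Int}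
    (h₁ : l₁.Pairwise (· ≤ ·)) (h₂ : l₂.Pairwise (· ≤ ·))
    (hm : ∀ x, x ∈ l₁ ↔ x ∈ l₂) : l₁.find? p = l₂.find? p := by
  cases hf : l₁.find? p with
  | some a =>
    obtain ⟨ha, hpa, hmin⟩ := (find?_some_iff_of_sorted h₁).mp hf
    exact ((find?_some_iff_of_sorted h₂).mpr
      ⟨(hm a).mp ha, hpa, fun x hx hpx => hmin x ((hm x).mpr hx) hpx⟩).symm
  | none =>
    symm
    rw [List.find?_eq_none] at hf ⊢
    intro x hx
    exact hf x ((hm x).mpr hx)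

-- the while loop computing r: r never decreases, (r+1)^2 exceeds n, and r^2 ≤ n unless the loop never ran
theorem isqLoop_spec (n r : Int) :
    r ≤ isqLoop n r ∧ n < (isqLoop n r + 1) * (isqLoop n r + 1) ∧
      (isqLoop n r = r ∨ isqLoop n r * isqLoop n r ≤ n) := by
  by_cases h : (r + 1) * (r + 1) ≤ n
  · rw [isqLoop, dif_pos h]
    obtain ⟨ih1, ih2, ih3⟩ := isqLoop_spec n (r + 1)
    refine ⟨by omega, ih2, Or.inr ?_⟩
    rcases ih3 with he | hle
    · rw [he]; exact h
    · exact hle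
  · rw [isqLoop, dif_neg h]
    exact ⟨le_refl r, by omega, Or.inl rfl⟩
termination_by (n - r).toNat
decreasing_by
  have h1 : 0 ≤ r * (r + 1) := by
    by_cases hr : 0 ≤ r
    · exact mul_nonneg hr (by omega)
    · nlinarith
  have h2 : r + 1 ≤ (r + 1) * (r + 1) := by nlinarith
  omega

-- divisors of n in [2, n) split exactly into those ≤ r and the cofactors n/d of those d ≤ r
theorem divisor_split (n r x : Int) (hn : 0 ≤ n) (hr1 : 1 ≤ r)
    (hub : n < (r + 1) * (r + 1)) (hlow : r = 1 ∨ r * r ≤ n) :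
    ((2 ≤ x ∧ x ≤ r ∧ x ∣ n) ∨ (∃ d, 2 ≤ d ∧ d ≤ r ∧ d ∣ n ∧ n / d = x ∧ x ≠ n))
      ↔ (2 ≤ x ∧ x < n ∧ x ∣ n) := by
  constructor
  · rintro (⟨h2, hxr, hdvd⟩ | ⟨d, hd2, hdr, hdvd, hfd, hxn⟩)
    · have hrr : r * r ≤ n := by rcases hlow with h | h; omega; exact h
      have hx2 : x * x ≤ r * r := mul_le_mul hxr hxr (by omega) (by omega)
      exact ⟨h2, by nlinarith, hdvd⟩
    · obtain ⟨k, hk⟩ := hdvd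
      have hkx : x = k := by
        rw [hk, Int.mul_ediv_cancel_left _ (by omega : d ≠ (0:Int))] at hfd
        omega
      subst hkx
      have hrr : r * r ≤ n := by rcases hlow with h | h; omega; exact h
      have hdd : d * d ≤ n := by nlinarith
      have hxd : d ≤ x := by nlinarith
      refine ⟨by omega, by nlinarith, ⟨d, by rw [hk]; ring⟩⟩
  · rintro ⟨h2, hxn, hdvd⟩
    by_cases hxr : x ≤ r
    · exact Or.inl ⟨h2, hxr, hdvd⟩
    · obtain ⟨k, hk⟩ := hdvd
      have hx0 : (0:Int) < x := by omega
      have hk2 : 2 ≤ k := by nlinarith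
      have hkr : k ≤ r := by nlinarith
      refine Or.inr ⟨k, hk2, hkr, ⟨x, by rw [hk]; ring⟩, ?_, by omega⟩
      rw [hk, mul_comm, Int.mul_ediv_cancel_left _ (by omega : k ≠ (0:Int))]

-- cofactors shrink as the divisor grows
theorem cof_mono (n a b : Int) (hn : 0 < n) (ha : a ∣ n) (hb : b ∣ n)
    (hb2 : 0 < b) (hab : b < a) : n / a ≤ n / b := by
  obtain ⟨xa, hxa⟩ := ha
  obtain ⟨xb, hxb⟩ := hb
  have ha0 : (0:Int) < a := by omega
  have h1 : n / a = xa := by rw [hxa, Int.mul_ediv_cancel_left _ (by omega : a ≠ (0:Int))]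
  have h2 : n / b = xb := by rw [hxb, Int.mul_ediv_cancel_left _ (by omega : b ≠ (0:Int))]
  rw [h1, h2]
  have hxb0 : (0:Int) < xb := by
    by_contra hcon
    push_neg at hcon
    nlinarith [mul_nonpos_of_nonneg_of_nonpos (le_of_lt hb2) hcon]
  by_contra hcon
  push_neg at hcon
  nlinarith [mul_lt_mul_of_pos_left hcon ha0, mul_lt_mul_of_pos_right hab hxb0]

-- every cofactor of a divisor d ≤ r is at least r
theorem cof_ge_r (n r d : Int) (hrr : r * r ≤ n) (hr0 : 0 < r) (hd2 : 2 ≤ d) (hdr : d ≤ r)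
    (hdvd : d ∣ n) : r ≤ n / d := by
  obtain ⟨k, hk⟩ := hdvd
  rw [hk, Int.mul_ediv_cancel_left _ (by omega : d ≠ (0:Int))]
  nlinarith

theorem main_equiv (num : Int) : specific_devider num = specific_devider_alt num := by
  simp only [specific_devider, specific_devider_alt]
  have hn : (0:Int) ≤ |num| := abs_nonneg num
  obtain ⟨hr1, hub, hlow⟩ := isqLoop_spec |num| 1
  generalize hN : |num| = n at *
  generalize hR : isqLoop n 1 = r at *
  -- names for the predicate and lists
  set P : Int → Bool := okB (digitsB n) with hP
  set q : Int → Bool := fun d => (PySem.Int.mod n d == 0 : Bool) with hq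
  -- A's count-of-coprime-digits test is B's all-digits test
  have hpredA : (fun i => (PySem.Int.mod n i == 0 : Bool) &&
      ((digitsA n).countP (fun j => pygcd i j == 1) == (digitsA n).length)) = fun i => q i && P i := by
    funext i
    have hrev : digitsA n = (digitsB n).reverse := by
      simp [digitsA, digitsB, List.map_reverse]
    congr 1
    rw [hrev, Bool.eq_iff_iff, beq_iff_eq, List.countP_reverse, List.length_reverse,
      List.countP_eq_length, hP, okB, List.all_eq_true]
  have hpredB : (fun d => (PySem.Int.mod n d == 0 : Bool) && okB (digitsB n) d) = fun d => q d && P d := rfl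
  rw [hpredA, hpredB, ← find?_filter_fuse, ← find?_filter_fuse,
    findSome?_ifchain (fun d => (PySem.Int.mod n d == 0 : Bool))
      (fun d => PySem.Int.floordiv n d) (fun c => c != n) P, ← hq]
  set D := (PySem.List.pyRange 2 n 1).filter q with hD
  set small := (PySem.List.pyRange 2 (r + 1) 1).filter q with hS
  set M := (((PySem.List.pyRange r 1 (-1)).filter q).map
      (fun d => PySem.Int.floordiv n d)).filter (fun c => c != n) with hM
  have hqd : ∀ d : Int, q d = true ↔ d ∣ n := by
    intro d
    simp only [hq, beq_iff_eq]
    exact PySem.Int.mod_eq_zero_iff_dvd n d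
  have hmemS : ∀ x : Int, x ∈ small ↔ (2 ≤ x ∧ x ≤ r ∧ x ∣ n) := by
    intro x
    rw [hS, List.mem_filter, PySem.List.mem_pyRange_one, hqd x]
    constructor
    · rintro ⟨⟨h1, h2⟩, h3⟩
      exact ⟨h1, by omega, h3⟩
    · rintro ⟨h1, h2, h3⟩
      exact ⟨⟨h1, by omega⟩, h3⟩
  have hmemD : ∀ x : Int, x ∈ D ↔ (2 ≤ x ∧ x < n ∧ x ∣ n) := by
    intro x
    rw [hD, List.mem_filter, PySem.List.mem_pyRange_one, hqd x]
    tauto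
  have hmemM : ∀ x : Int, x ∈ M ↔ ∃ d, 2 ≤ d ∧ d ≤ r ∧ d ∣ n ∧ n / d = x ∧ x ≠ n := by
    intro x
    rw [hM, List.mem_filter, List.mem_map]
    constructor
    · rintro ⟨⟨d, hd, rfl⟩, hne⟩
      rw [List.mem_filter, PySem.List.mem_pyRange_neg_one] at hd
      obtain ⟨⟨hd1, hdr⟩, hdq⟩ := hd
      refine ⟨d, by omega, hdr, (hqd d).mp hdq, ?_, by simpa using hne⟩
      rw [PySem.Int.floordiv_eq_ediv_of_pos (by omega)]
    · rintro ⟨d, hd2, hdr, hdvd, hfd, hne⟩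
      refine ⟨⟨d, ?_, ?_⟩, by simpa using hne⟩
      · rw [List.mem_filter, PySem.List.mem_pyRange_neg_one]
        exact ⟨⟨by omega, hdr⟩, (hqd d).mpr hdvd⟩
      · rw [PySem.Int.floordiv_eq_ediv_of_pos (by omega)]
        exact hfd
  have hpairS : small.Pairwise (· ≤ ·) :=
    (List.Pairwise.sublist (List.filter_sublist) (PySem.List.pairwise_lt_pyRange_one _ _)).imp
      (fun h => le_of_lt h)
  have hpairD : D.Pairwise (· ≤ ·) :=
    (List.Pairwise.sublist (List.filter_sublist) (PySem.List.pairwise_lt_pyRange_one _ _)).imp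
      (fun h => le_of_lt h)
  have hdesc : (PySem.List.pyRange r 1 (-1)).Pairwise (fun a b => b < a) := by
    rw [PySem.List.pyRange_neg_one_eq_reverse, List.pairwise_reverse]
    exact (PySem.List.pairwise_lt_pyRange_one _ _)
  have hfil : ((PySem.List.pyRange r 1 (-1)).filter q).Pairwise (fun a b => b < a) :=
    List.Pairwise.sublist (List.filter_sublist) hdesc
  have hpairM : M.Pairwise (· ≤ ·) := by
    apply List.Pairwise.sublist (List.filter_sublist)
    rw [List.pairwise_map]
    refine List.Pairwise.imp_of_mem ?_ hfil
    intro a b ha hb hab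
    rw [List.mem_filter, PySem.List.mem_pyRange_neg_one] at ha hb
    obtain ⟨⟨ha1, har⟩, haq⟩ := ha
    obtain ⟨⟨hb1, hbr⟩, hbq⟩ := hb
    have hrr : r * r ≤ n := by
      rcases hlow with h | h
      · omega
      · exact h
    have hn0 : (0:Int) < n := by nlinarith
    rw [PySem.Int.floordiv_eq_ediv_of_pos (by omega), PySem.Int.floordiv_eq_ediv_of_pos (by omega)]
    exact cof_mono n a b hn0 ((hqd a).mp haq) ((hqd b).mp hbq) (by omega) hab
  have hpair : (small ++ M).Pairwise (· ≤ ·) := by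
    rw [List.pairwise_append]
    refine ⟨hpairS, hpairM, ?_⟩
    intro a ha b hb
    rw [hmemS a] at ha
    rw [hmemM b] at hb
    obtain ⟨ha2, har, _⟩ := ha
    obtain ⟨d, hd2, hdr, hdvd, hfd, _⟩ := hb
    have hrr : r * r ≤ n := by
      rcases hlow with h | h
      · omega
      · exact h
    have := cof_ge_r n r d hrr (by omega) hd2 hdr hdvd
    rw [hfd] at this
    omega
  have hmem : ∀ x : Int, x ∈ small ++ M ↔ x ∈ D := by
    intro x
    rw [List.mem_append, hmemS x, hmemM x, hmemD x]
    exact divisor_split n r x hn hr1 hub hlow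
  have key : D.find? P = (small ++ M).find? P :=
    find?_eq_of_sorted hpairD hpair (fun x => (hmem x).symm)
  rw [key, List.find?_append]
  cases hs : small.find? P
  · cases hm : M.find? P <;> simp
  · simp

-- ===== VERDICT (by name: the statement is the Claim_ definition above) =====
theorem specific_devider_spec : Claim_equal_specific_devider := by
  intro num _
  unfold Spec_specific_devider
  exact main_equiv num
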